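-- pv_equiv track=rewrite | github.com/hert3863/DPHIL | ANC.py | NumberBetween
-- ===== SOURCE A (Python) =====
-- def EnumerateASCII(a):
--     # convert a character to sensible digit i.e. make 0=0, 9=9, a=10, z=35
--     d = ord(a)
--     if d > 96:          # 'a'
--         d = d - 87
--     elif d > 64:        # 'A'
--         d = d - 55
--     elif d > 47:        # '0'
--         d = d - 48
--
--     return d
--
-- def NumberBetween(s1, s2):
--     # calculate the number of ascii characters between s1 and s2
--     # i.e. the number of times next has to be called for s1 == s2
--
--     # check the strings are the same length
--     l = len(s1)
--     if not l == len(s2):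
--         return 0
--
--     # loop thru and calculate s2[i] - s1[i] * (l - 1 - i) * 36
--     d = 0
--     for i in range(0, l):
--         o2 = EnumerateASCII(s2[i])
--         o1 = EnumerateASCII(s1[i])
--         t = (o2 - o1)
--         t = t * 36 ** (l - i - 1)
--         d = d + t
--     return d
-- ===== SOURCE B (Python) =====
-- def EnumerateASCII(a):
--     # convert a character to sensible digit i.e. make 0=0, 9=9, a=10, z=35
--     d = ord(a)
--     if d > 96:          # 'a'
--         d = d - 87
--     elif d > 64:        # 'A'
--         d = d - 55
--     elif d > 47:        # '0'
--         d = d - 48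
--
--     return d
--
-- def _Value(s):
--     # the base-36 integer value of a whole string
--     v = 0
--     for c in s:
--         v = v * 36 + EnumerateASCII(c)
--     return v
--
-- def NumberBetween(s1, s2):
--     # interpret each string as a base-36 number and subtract
--     if len(s1) != len(s2):
--         return 0
--     return _Value(s2) - _Value(s1)
-- ===== Notes on version B (the rewrite author's own statement) =====
-- stated objective: faster
-- what changed: Instead of summing per-position digit differences weighted by fresh powers 36**(l-i-1), B converts each string independently to its base-36 integer value (one accumulator pass per string, no power and no per-position difference ever computed) and returns the subtraction of the two values.
import Mathlib
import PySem

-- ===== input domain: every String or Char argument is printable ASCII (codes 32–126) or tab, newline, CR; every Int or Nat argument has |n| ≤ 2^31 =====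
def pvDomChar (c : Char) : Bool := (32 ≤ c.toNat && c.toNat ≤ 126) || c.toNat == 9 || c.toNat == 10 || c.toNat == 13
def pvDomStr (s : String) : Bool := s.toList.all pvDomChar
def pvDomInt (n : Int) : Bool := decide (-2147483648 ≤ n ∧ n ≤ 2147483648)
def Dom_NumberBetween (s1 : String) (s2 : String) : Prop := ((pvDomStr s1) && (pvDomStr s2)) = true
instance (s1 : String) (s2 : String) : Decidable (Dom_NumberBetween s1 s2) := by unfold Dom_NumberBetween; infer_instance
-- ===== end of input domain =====

-- B converts each string independently to its base-36 value and subtracts, instead of summing per-position digit differences weighted by powers (alternative decomposition).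

-- ===== PORT A =====
def EnumerateASCII (a : Char) : Int :=
  let d : Int := (a.toNat : Int)
  if d > 96 then d - 87
  else if d > 64 then d - 55
  else if d > 47 then d - 48
  else d

def NumberBetween (s1 : String) (s2 : String) : Int :=
  let l : Int := (s1.toList.length : Int)
  if ¬ (l = (s2.toList.length : Int)) then 0
  else
    (PySem.List.pyRange 0 l 1).foldl (fun d i =>
      let o2 := EnumerateASCII (PySem.List.pyGetD s2.toList i ' ')
      let o1 := EnumerateASCII (PySem.List.pyGetD s1.toList i ' ')
      let t := o2 - o1
      let t := t * 36 ^ (l - i - 1).toNat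
      d + t) 0

-- ===== PORT B =====
def pyvalue (s : String) : Int :=
  s.toList.foldl (fun v c => v * 36 + EnumerateASCII c) 0

def NumberBetween_alt (s1 : String) (s2 : String) : Int :=
  if s1.toList.length ≠ s2.toList.length then 0
  else pyvalue s2 - pyvalue s1

-- ===== PRECONDITION & SPEC =====
def Spec_NumberBetween (s1 : String) (s2 : String) (out : Int) : Prop := out = NumberBetween_alt s1 s2
instance (s1 : String) (s2 : String) (out : Int) : Decidable (Spec_NumberBetween s1 s2 out) := by unfold Spec_NumberBetween; infer_instance

-- ===== CLAIM (what is proved, stated in full; the proofs are below) =====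
def Claim_equal_NumberBetween : Prop := ∀ (s1 : String) (s2 : String), Dom_NumberBetween s1 s2 → Spec_NumberBetween s1 s2 (NumberBetween s1 s2)

-- ===== LEMMAS AND PROOFS =====

-- A list's base-36 value fold with an arbitrary accumulator.
theorem value_shift (xs : List Char) (a : Int) :
    xs.foldl (fun v c => v * 36 + EnumerateASCII c) a
      = a * 36 ^ xs.length + xs.foldl (fun v c => v * 36 + EnumerateASCII c) 0 := by
  induction xs generalizing a with
  | nil => simp
  | cons x xs ih =>
    simp only [List.foldl_cons, List.length_cons]
    rw [ih (a * 36 + _), ih (0 * 36 + _)]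
    ring

-- The positional power sum equals the difference of the two base-36 values, for equal-length lists.
theorem power_sum_eq_value_diff (xs ys : List Char) (h : xs.length = ys.length) :
    ((List.range xs.length).map (fun k =>
        (EnumerateASCII (ys.getD k ' ') - EnumerateASCII (xs.getD k ' '))
          * 36 ^ (xs.length - 1 - k))).sum
      = ys.foldl (fun v c => v * 36 + EnumerateASCII c) 0
        - xs.foldl (fun v c => v * 36 + EnumerateASCII c) 0 := by
  induction xs generalizing ys with
  | nil =>
    cases ys with
    | nil => simp
    | cons y ys => simp at h
  | cons x xs ih =>
    cases ys with
    | nil => simp at h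
    | cons y ys =>
      simp only [List.length_cons, Nat.add_right_cancel_iff] at h
      simp only [List.length_cons, List.foldl_cons]
      rw [List.range_succ_eq_map]
      simp only [List.map_cons, List.map_map, List.sum_cons]
      have hstep : ∀ k ∈ List.range xs.length,
          ((fun k => (EnumerateASCII ((y :: ys).getD k ' ') - EnumerateASCII ((x :: xs).getD k ' '))
              * 36 ^ (xs.length + 1 - 1 - k)) ∘ Nat.succ) k
            = (fun k => (EnumerateASCII (ys.getD k ' ') - EnumerateASCII (xs.getD k ' '))
              * 36 ^ (xs.length - 1 - k)) k := by
        intro k hk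
        simp only [Function.comp, List.getD_cons_succ]
        congr 2
        omega
      rw [List.map_congr_left hstep, ih ys h]
      rw [value_shift ys (0 * 36 + EnumerateASCII y), value_shift xs (0 * 36 + EnumerateASCII x), h]
      simp only [List.getD_cons_zero, Nat.add_sub_cancel, Nat.sub_zero]
      ring

-- ===== VERDICT (by name: the statement is the Claim_ definition above) =====
theorem NumberBetween_spec : Claim_equal_NumberBetween := by
  intro s1 s2 _
  show NumberBetween s1 s2 = NumberBetween_alt s1 s2
  unfold NumberBetween NumberBetween_alt pyvalue
  by_cases h : s1.toList.length = s2.toList.length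
  · rw [if_neg (by simp [h]), if_neg (by simp [h])]
    rw [PySem.List.foldl_add (g := fun i =>
      (EnumerateASCII (PySem.List.pyGetD s2.toList i ' ')
        - EnumerateASCII (PySem.List.pyGetD s1.toList i ' '))
        * 36 ^ ((s1.toList.length : Int) - i - 1).toNat)]
    rw [PySem.List.pyRange_one, zero_add]
    simp only [Int.sub_zero, List.map_map]
    have hstep : ∀ k ∈ List.range ((s1.toList.length : Int)).toNat,
        ((fun i =>
          (EnumerateASCII (PySem.List.pyGetD s2.toList i ' ')
            - EnumerateASCII (PySem.List.pyGetD s1.toList i ' '))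
            * 36 ^ ((s1.toList.length : Int) - i - 1).toNat) ∘ (fun k : ℕ => 0 + (k : Int))) k
        = (fun k => (EnumerateASCII (s2.toList.getD k ' ') - EnumerateASCII (s1.toList.getD k ' '))
            * 36 ^ (s1.toList.length - 1 - k)) k := by
      intro k hk
      simp only [Function.comp, zero_add, PySem.List.pyGetD_natCast]
      congr 2
      omega
    rw [List.map_congr_left hstep]
    simp only [Int.toNat_natCast]
    exact power_sum_eq_value_diff s1.toList s2.toList h
  · rw [if_pos (by exact_mod_cast h), if_pos h]
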